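-- pv_equiv track=rewrite | github.com/marastin/HackerRank | Python Examples/string_the_minion_game.py | calc_stuart_points
-- ===== SOURCE A (Python) =====
-- def calc_stuart_points(string: str) -> int:
--     result = 0
--     vowels = "AEIOU"
--     result = 0
--     L = len(string)
--     for idx in range(L):
--         if string[idx] not in vowels:
--             result += L - idx
--     return result
-- ===== SOURCE B (Python) =====
-- def calc_stuart_points(string: str) -> int:
--     seen = 0
--     total = 0
--     for ch in string:
--         if ch not in "AEIOU":
--             seen += 1
--         total += seen
--     return total
-- ===== Notes on version B (the rewrite author's own statement) =====
-- stated objective: simpler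
-- what changed: Reindexes the sum by substring end position: a single pass keeps a running count of consonants seen so far and adds it at each character, eliminating len()/indexing and the L-idx term.
import Mathlib
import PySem

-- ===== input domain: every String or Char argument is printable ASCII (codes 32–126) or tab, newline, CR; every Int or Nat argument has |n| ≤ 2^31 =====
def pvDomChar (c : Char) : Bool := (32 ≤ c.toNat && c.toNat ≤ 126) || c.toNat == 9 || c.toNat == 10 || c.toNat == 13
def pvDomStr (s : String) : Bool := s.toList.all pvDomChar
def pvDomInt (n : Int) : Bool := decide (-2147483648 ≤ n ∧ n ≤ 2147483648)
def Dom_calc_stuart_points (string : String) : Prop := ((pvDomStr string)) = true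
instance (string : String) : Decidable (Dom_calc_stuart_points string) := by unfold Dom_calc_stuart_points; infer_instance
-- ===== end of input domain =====

-- B replaces A's positional sum (L - idx per consonant start) by a single pass that keeps a
-- running count of consonants seen so far and adds it at every character (objective: simpler).

-- ===== PORT A =====
def calc_stuart_points (string : String) : Int :=
  let vowels : List Char := "AEIOU".toList
  let l : List Char := string.toList
  let L : Int := l.length
  (PySem.List.pyRange 0 L 1).foldl
    (fun result idx =>
      if ¬ (vowels.contains (PySem.List.pyGetD l idx ' ')) then result + (L - idx) else result)
    0

-- ===== PORT B =====
def calc_stuart_points_alt (string : String) : Int :=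
  (string.toList.foldl
    (fun (p : Int × Int) ch =>
      let seen : Int := if ¬ (("AEIOU".toList).contains ch) then p.1 + 1 else p.1
      (seen, p.2 + seen))
    (0, 0)).2

-- ===== PRECONDITION & SPEC =====
def Spec_calc_stuart_points (string : String) (out : Int) : Prop := out = calc_stuart_points_alt string
instance (string : String) (out : Int) : Decidable (Spec_calc_stuart_points string out) := by unfold Spec_calc_stuart_points; infer_instance

-- ===== CLAIM (what is proved, stated in full; the proofs are below) =====
def Claim_equal_calc_stuart_points : Prop := ∀ (string : String), Dom_calc_stuart_points string → Spec_calc_stuart_points string (calc_stuart_points string)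

-- ===== LEMMAS AND PROOFS =====

-- consonant indicator (as Int)
def pvD (c : Char) : Int := if ¬ (("AEIOU".toList).contains c) then 1 else 0

-- number of consonants in l, as Int
def pvCnt (l : List Char) : Int := (l.map pvD).sum

-- the common value both loops compute, in head-structural form
def pvW : List Char → Int
  | [] => 0
  | c :: t => pvD c * ((t.length : Int) + 1) + pvW t

-- A's fold as a sum over the index range
def pvSA (l : List Char) : Int :=
  ((PySem.List.pyRange 0 (l.length : Int) 1).map
    (fun i => if ¬ (("AEIOU".toList).contains (PySem.List.pyGetD l i ' ')) then (l.length : Int) - i else 0)).sum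

theorem pvA_eq_SA (s : String) : calc_stuart_points s = pvSA s.toList := by
  unfold calc_stuart_points pvSA
  dsimp only
  have hcongr := PySem.List.foldl_congr_mem
    (PySem.List.pyRange 0 (s.toList.length : Int) 1)
    (fun result idx =>
      if ¬ (("AEIOU".toList).contains (PySem.List.pyGetD s.toList idx ' ')) then result + ((s.toList.length : Int) - idx) else result)
    (fun result idx =>
      result + (if ¬ (("AEIOU".toList).contains (PySem.List.pyGetD s.toList idx ' ')) then (s.toList.length : Int) - idx else 0))
    0
    (by intro acc x _; dsimp only; split_ifs <;> simp)
  rw [hcongr, PySem.List.foldl_add]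
  simp

theorem pvW_append (l : List Char) (c : Char) :
    pvW (l ++ [c]) = pvW l + pvCnt l + pvD c := by
  induction l with
  | nil => simp [pvW, pvCnt]
  | cons x t ih =>
      simp only [List.cons_append, pvW, ih, pvCnt, List.map_cons, List.sum_cons,
        List.length_append, List.length_cons, List.length_nil]
      push_cast
      ring

theorem pvCnt_eq (l : List Char) :
    ((PySem.List.pyRange 0 (l.length : Int) 1).map
      (fun i => pvD (PySem.List.pyGetD l i ' '))).sum = pvCnt l := by
  have h := PySem.List.map_pyGetD_pyRange_zero' l ' '
  calc ((PySem.List.pyRange 0 (l.length : Int) 1).map (fun i => pvD (PySem.List.pyGetD l i ' '))).sum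
      = (((PySem.List.pyRange 0 (l.length : Int) 1).map (fun i => PySem.List.pyGetD l i ' ')).map pvD).sum := by
        rw [List.map_map]; rfl
    _ = pvCnt l := by rw [h]; rfl

theorem pvSA_eq_W (l : List Char) : pvSA l = pvW l := by
  induction l using List.reverseRecOn with
  | nil => simp [pvSA, pvW, PySem.List.pyRange_one_eq_nil]
  | append_singleton t c ih =>
      rw [pvW_append]
      unfold pvSA
      have hlen : ((t ++ [c]).length : Int) = (t.length : Int) + 1 := by simp
      rw [hlen, PySem.List.pyRange_one_succ_right (by positivity)]
      rw [List.map_append, List.sum_append]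
      have hlast : PySem.List.pyGetD (t ++ [c]) (t.length : Int) ' ' = c := by
        rw [PySem.List.pyGetD_eq_getElem (t ++ [c]) ' ' (by positivity) (by simp)]
        simp
      have hmid : ∀ i ∈ PySem.List.pyRange 0 (t.length : Int) 1,
          (if ¬ (("AEIOU".toList).contains (PySem.List.pyGetD (t ++ [c]) i ' ')) then ((t.length : Int) + 1) - i else 0)
          = (if ¬ (("AEIOU".toList).contains (PySem.List.pyGetD t i ' ')) then (t.length : Int) - i else 0) + pvD (PySem.List.pyGetD t i ' ') := by
        intro i hi
        rw [PySem.List.mem_pyRange_one] at hi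
        have hget : PySem.List.pyGetD (t ++ [c]) i ' ' = PySem.List.pyGetD t i ' ' := by
          rw [PySem.List.pyGetD_eq_getElem (t ++ [c]) ' ' hi.1
                (by simp only [List.length_append, List.length_cons, List.length_nil]; push_cast; omega),
              PySem.List.pyGetD_eq_getElem t ' ' hi.1 hi.2]
          rw [List.getElem_append_left (by omega)]
        rw [hget]
        unfold pvD
        split_ifs <;> ring
      rw [List.map_congr_left hmid, PySem.List.sum_map_add_int, pvCnt_eq]
      have ih2 : ((PySem.List.pyRange 0 (t.length : Int) 1).map
          (fun i => if ¬ (("AEIOU".toList).contains (PySem.List.pyGetD t i ' ')) then (t.length : Int) - i else 0)).sum = pvW t := ih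
      rw [ih2]
      simp [hlast, pvD]

theorem pvB_eq (l : List Char) (s r : Int) :
    l.foldl
      (fun (p : Int × Int) ch =>
        let seen : Int := if ¬ (("AEIOU".toList).contains ch) then p.1 + 1 else p.1
        (seen, p.2 + seen))
      (s, r)
    = (s + pvCnt l, r + s * (l.length : Int) + pvW l) := by
  induction l generalizing s r with
  | nil => simp [pvCnt, pvW]
  | cons c t ih =>
      simp only [List.foldl_cons, ih, pvCnt, pvW, List.map_cons, List.sum_cons, List.length_cons]
      unfold pvD
      split_ifs <;> (refine Prod.ext ?_ ?_ <;> push_cast <;> ring)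

-- ===== VERDICT (by name: the statement is the Claim_ definition above) =====
theorem calc_stuart_points_spec : Claim_equal_calc_stuart_points := by
  intro s _
  unfold Spec_calc_stuart_points calc_stuart_points_alt
  rw [pvA_eq_SA, pvSA_eq_W, pvB_eq]
  simp
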